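-- pv_equiv track=rewrite | github.com/pradeepku123/my-wealth-management-app | backend/app/utils/fund_classifier.py | classify_fund
-- ===== SOURCE A (Python) =====
-- def classify_fund(scheme_name):
--     """Classify mutual fund by category and sub-category based on scheme name."""
--     name_upper = scheme_name.upper()
--
--     # Determine category (Equity or Debt)
--     # Determine category (Equity or Debt)
--     if any(keyword in name_upper for keyword in ['EQUITY', 'BLUECHIP', 'LARGECAP', 'MIDCAP', 'SMALLCAP', 'MULTICAP', 'FLEXICAP', 'FOCUSED', 'ELSS', 'TAX SAVER', 'INDEX', 'VALUE', 'CONTRA', 'DIVIDEND', 'SECTOR', 'THEMATIC', 'PHARMA', 'TECHNOLOGY', 'INFRASTRUCTURE']):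
--         category = 'Equity'
--     elif any(keyword in name_upper for keyword in ['DEBT', 'BOND', 'GILT', 'LIQUID', 'ULTRA SHORT', 'SHORT TERM', 'MEDIUM TERM', 'LONG TERM', 'CORPORATE BOND', 'FIXED', 'INCOME', 'CREDIT RISK', 'FLOATING RATE', 'MONEY MARKET', 'TREASURY', 'PSU', 'BANKING & PSU']):
--         category = 'Debt'
--     else:
--         category = 'Other'
--
--     # Determine sub-category for Equity funds
--     if category == 'Equity':
--         if any(keyword in name_upper for keyword in ['LARGE CAP', 'LARGECAP', 'BLUECHIP', 'TOP 100', 'NIFTY 50']):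
--             sub_category = 'Large Cap'
--         elif any(keyword in name_upper for keyword in ['MID CAP', 'MIDCAP', 'MID-CAP']):
--             sub_category = 'Mid Cap'
--         elif any(keyword in name_upper for keyword in ['SMALL CAP', 'SMALLCAP', 'SMALL-CAP']):
--             sub_category = 'Small Cap'
--         elif any(keyword in name_upper for keyword in ['MULTI CAP', 'MULTICAP', 'MULTI-CAP']):
--             sub_category = 'Multi Cap'
--         elif any(keyword in name_upper for keyword in ['FLEXI CAP', 'FLEXICAP', 'FLEXI-CAP']):
--             sub_category = 'Flexi Cap'
--         else:
--             sub_category = 'Other Equity'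
--     elif category == 'Debt':
--         if any(keyword in name_upper for keyword in ['LIQUID', 'OVERNIGHT']):
--             sub_category = 'Liquid'
--         elif any(keyword in name_upper for keyword in ['ULTRA SHORT', 'SHORT TERM']):
--             sub_category = 'Short Term'
--         elif any(keyword in name_upper for keyword in ['MEDIUM TERM', 'INTERMEDIATE']):
--             sub_category = 'Medium Term'
--         elif any(keyword in name_upper for keyword in ['LONG TERM', 'GILT']):
--             sub_category = 'Long Term'
--         else:
--             sub_category = 'Other Debt'
--     else:
--         sub_category = 'Other'
--
--     return category, sub_category
-- ===== SOURCE B (Python) =====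
-- # Flat keyword tables: each keyword carries a (priority, label); classification is
-- # the minimum-priority matched keyword over one pass (no per-label cascade).
--
-- EQUITY_KWS = ['EQUITY', 'BLUECHIP', 'LARGECAP', 'MIDCAP', 'SMALLCAP', 'MULTICAP', 'FLEXICAP', 'FOCUSED', 'ELSS', 'TAX SAVER', 'INDEX', 'VALUE', 'CONTRA', 'DIVIDEND', 'SECTOR', 'THEMATIC', 'PHARMA', 'TECHNOLOGY', 'INFRASTRUCTURE']
-- DEBT_KWS = ['DEBT', 'BOND', 'GILT', 'LIQUID', 'ULTRA SHORT', 'SHORT TERM', 'MEDIUM TERM', 'LONG TERM', 'CORPORATE BOND', 'FIXED', 'INCOME', 'CREDIT RISK', 'FLOATING RATE', 'MONEY MARKET', 'TREASURY', 'PSU', 'BANKING & PSU']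
--
-- CAT_TABLE = [(kw, 0, 'Equity') for kw in EQUITY_KWS] + [(kw, 1, 'Debt') for kw in DEBT_KWS]
--
-- SUB_TABLES = {
--     'Equity': (
--         [(kw, 0, 'Large Cap') for kw in ['LARGE CAP', 'LARGECAP', 'BLUECHIP', 'TOP 100', 'NIFTY 50']]
--         + [(kw, 1, 'Mid Cap') for kw in ['MID CAP', 'MIDCAP', 'MID-CAP']]
--         + [(kw, 2, 'Small Cap') for kw in ['SMALL CAP', 'SMALLCAP', 'SMALL-CAP']]
--         + [(kw, 3, 'Multi Cap') for kw in ['MULTI CAP', 'MULTICAP', 'MULTI-CAP']]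
--         + [(kw, 4, 'Flexi Cap') for kw in ['FLEXI CAP', 'FLEXICAP', 'FLEXI-CAP']],
--         'Other Equity'),
--     'Debt': (
--         [(kw, 0, 'Liquid') for kw in ['LIQUID', 'OVERNIGHT']]
--         + [(kw, 1, 'Short Term') for kw in ['ULTRA SHORT', 'SHORT TERM']]
--         + [(kw, 2, 'Medium Term') for kw in ['MEDIUM TERM', 'INTERMEDIATE']]
--         + [(kw, 3, 'Long Term') for kw in ['LONG TERM', 'GILT']],
--         'Other Debt'),
-- }
--
--
-- def _best(name_upper, table, default):
--     """Scan ALL keywords, keep the matched (priority, label) with minimal priority."""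
--     best = None
--     for kw, prio, label in table:
--         if kw in name_upper and (best is None or prio < best[0]):
--             best = (prio, label)
--     return best[1] if best is not None else default
--
--
-- def classify_fund(scheme_name):
--     """Classify mutual fund by category and sub-category based on scheme name."""
--     name_upper = scheme_name.upper()
--     category = _best(name_upper, CAT_TABLE, 'Other')
--     sub_table, sub_default = SUB_TABLES.get(category, ([], 'Other'))
--     sub_category = _best(name_upper, sub_table, sub_default)
--     return category, sub_category
-- ===== Notes on version B (the rewrite author's own statement) =====
-- stated objective: alternative
-- what changed: Replaced the first-match if/elif cascades by flat keyword tables tagging each keyword with a numeric priority and label; a single full pass per level keeps the matched entry of minimal priority (no early exit, no per-label grouping in control flow), which coincides with A's cascade because priorities follow the original precedence.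
import Mathlib
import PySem

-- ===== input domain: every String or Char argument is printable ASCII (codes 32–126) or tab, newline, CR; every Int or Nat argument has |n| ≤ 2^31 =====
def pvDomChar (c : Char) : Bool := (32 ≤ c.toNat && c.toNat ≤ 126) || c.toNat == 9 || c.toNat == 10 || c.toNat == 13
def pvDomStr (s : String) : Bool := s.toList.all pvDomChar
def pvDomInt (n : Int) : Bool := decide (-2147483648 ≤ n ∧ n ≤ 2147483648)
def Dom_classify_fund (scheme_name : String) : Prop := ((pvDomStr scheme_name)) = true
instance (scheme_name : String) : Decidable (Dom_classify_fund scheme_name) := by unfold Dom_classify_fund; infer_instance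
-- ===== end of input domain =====

-- B replaces A's first-match if/elif cascades by flat priority-tagged keyword tables scanned
-- in one full pass keeping the minimal-priority match (objective: alternative); return value unchanged.

-- ===== PORT A =====
def classify_fund (scheme_name : String) : String × String :=
  let name_upper := PySem.Str.upper scheme_name
  let category :=
    if ["EQUITY", "BLUECHIP", "LARGECAP", "MIDCAP", "SMALLCAP", "MULTICAP", "FLEXICAP", "FOCUSED", "ELSS", "TAX SAVER", "INDEX", "VALUE", "CONTRA", "DIVIDEND", "SECTOR", "THEMATIC", "PHARMA", "TECHNOLOGY", "INFRASTRUCTURE"].any (fun k => PySem.Str.isIn k name_upper) then "Equity"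
    else if ["DEBT", "BOND", "GILT", "LIQUID", "ULTRA SHORT", "SHORT TERM", "MEDIUM TERM", "LONG TERM", "CORPORATE BOND", "FIXED", "INCOME", "CREDIT RISK", "FLOATING RATE", "MONEY MARKET", "TREASURY", "PSU", "BANKING & PSU"].any (fun k => PySem.Str.isIn k name_upper) then "Debt"
    else "Other"
  let sub_category :=
    if category = "Equity" then
      if ["LARGE CAP", "LARGECAP", "BLUECHIP", "TOP 100", "NIFTY 50"].any (fun k => PySem.Str.isIn k name_upper) then "Large Cap"
      else if ["MID CAP", "MIDCAP", "MID-CAP"].any (fun k => PySem.Str.isIn k name_upper) then "Mid Cap"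
      else if ["SMALL CAP", "SMALLCAP", "SMALL-CAP"].any (fun k => PySem.Str.isIn k name_upper) then "Small Cap"
      else if ["MULTI CAP", "MULTICAP", "MULTI-CAP"].any (fun k => PySem.Str.isIn k name_upper) then "Multi Cap"
      else if ["FLEXI CAP", "FLEXICAP", "FLEXI-CAP"].any (fun k => PySem.Str.isIn k name_upper) then "Flexi Cap"
      else "Other Equity"
    else if category = "Debt" then
      if ["LIQUID", "OVERNIGHT"].any (fun k => PySem.Str.isIn k name_upper) then "Liquid"
      else if ["ULTRA SHORT", "SHORT TERM"].any (fun k => PySem.Str.isIn k name_upper) then "Short Term"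
      else if ["MEDIUM TERM", "INTERMEDIATE"].any (fun k => PySem.Str.isIn k name_upper) then "Medium Term"
      else if ["LONG TERM", "GILT"].any (fun k => PySem.Str.isIn k name_upper) then "Long Term"
      else "Other Debt"
    else "Other"
  (category, sub_category)

-- ===== PORT B =====
-- CAT_TABLE = [(kw,0,'Equity') for kw in EQUITY_KWS] + [(kw,1,'Debt') for kw in DEBT_KWS]
def pvCatTable : List (String × Nat × String) :=
  (["EQUITY", "BLUECHIP", "LARGECAP", "MIDCAP", "SMALLCAP", "MULTICAP", "FLEXICAP", "FOCUSED", "ELSS", "TAX SAVER", "INDEX", "VALUE", "CONTRA", "DIVIDEND", "SECTOR", "THEMATIC", "PHARMA", "TECHNOLOGY", "INFRASTRUCTURE"].map (fun kw => (kw, 0, "Equity")))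
  ++ (["DEBT", "BOND", "GILT", "LIQUID", "ULTRA SHORT", "SHORT TERM", "MEDIUM TERM", "LONG TERM", "CORPORATE BOND", "FIXED", "INCOME", "CREDIT RISK", "FLOATING RATE", "MONEY MARKET", "TREASURY", "PSU", "BANKING & PSU"].map (fun kw => (kw, 1, "Debt")))

def pvSubTables : PySem.Dict String (List (String × Nat × String) × String) :=
  PySem.Dict.ofList
    [("Equity",
       ((["LARGE CAP", "LARGECAP", "BLUECHIP", "TOP 100", "NIFTY 50"].map (fun kw => (kw, 0, "Large Cap")))
        ++ (["MID CAP", "MIDCAP", "MID-CAP"].map (fun kw => (kw, 1, "Mid Cap")))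
        ++ (["SMALL CAP", "SMALLCAP", "SMALL-CAP"].map (fun kw => (kw, 2, "Small Cap")))
        ++ (["MULTI CAP", "MULTICAP", "MULTI-CAP"].map (fun kw => (kw, 3, "Multi Cap")))
        ++ (["FLEXI CAP", "FLEXICAP", "FLEXI-CAP"].map (fun kw => (kw, 4, "Flexi Cap"))),
        "Other Equity")),
     ("Debt",
       ((["LIQUID", "OVERNIGHT"].map (fun kw => (kw, 0, "Liquid")))
        ++ (["ULTRA SHORT", "SHORT TERM"].map (fun kw => (kw, 1, "Short Term")))
        ++ (["MEDIUM TERM", "INTERMEDIATE"].map (fun kw => (kw, 2, "Medium Term")))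
        ++ (["LONG TERM", "GILT"].map (fun kw => (kw, 3, "Long Term"))),
        "Other Debt"))]

-- the loop of _best: keep the matched (priority, label) of minimal priority
def pvBest (name_upper : String) : List (String × Nat × String) → Option (Nat × String) → Option (Nat × String)
  | [], best => best
  | (kw, prio, label) :: rest, best =>
      pvBest name_upper rest
        (if PySem.Str.isIn kw name_upper && (best.isNone || decide (prio < (best.getD (0, "")).1))
         then some (prio, label) else best)

def classify_fund_alt (scheme_name : String) : String × String :=
  let name_upper := PySem.Str.upper scheme_name
  let category := match pvBest name_upper pvCatTable none with
    | some b => b.2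
    | none => "Other"
  let sd := (pvSubTables.get? category).getD ([], "Other")
  let sub_category := match pvBest name_upper sd.1 none with
    | some b => b.2
    | none => sd.2
  (category, sub_category)

-- ===== PRECONDITION & SPEC =====
def Spec_classify_fund (scheme_name : String) (out : String × String) : Prop := out = classify_fund_alt scheme_name
instance (scheme_name : String) (out : String × String) : Decidable (Spec_classify_fund scheme_name out) := by unfold Spec_classify_fund; infer_instance

-- ===== CLAIM (what is proved, stated in full; the proofs are below) =====
def Claim_equal_classify_fund : Prop := ∀ (scheme_name : String), Dom_classify_fund scheme_name → Spec_classify_fund scheme_name (classify_fund scheme_name)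

-- ===== LEMMAS AND PROOFS =====
-- Once the accumulator holds a priority no later entry beats, the scan keeps it.
theorem pvBest_keep (u : String) (table : List (String × Nat × String)) (r : Nat) (lab : String)
    (h : ∀ p ∈ table, r ≤ p.2.1) : pvBest u table (some (r, lab)) = some (r, lab) := by
  induction table with
  | nil => rfl
  | cons q rest ih =>
    obtain ⟨kw, prio, label⟩ := q
    have hq : r ≤ prio := h (kw, prio, label) (List.mem_cons_self ..)
    simp only [pvBest, Option.isNone_some, Bool.false_or, Option.getD_some]
    rw [if_neg]
    · exact ih (fun p hp => h p (List.mem_cons_of_mem _ hp))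
    · simp [Nat.not_lt.mpr hq]

-- A block of keywords sharing one (priority, label), followed by entries of ≥ priority:
-- the scan returns that entry iff some keyword of the block matches.
theorem pvBest_group (u : String) (l : List String) (r : Nat) (lab : String)
    (rest : List (String × Nat × String)) (h : ∀ p ∈ rest, r ≤ p.2.1) :
    pvBest u (l.map (fun kw => (kw, r, lab)) ++ rest) none =
      if l.any (fun k => PySem.Str.isIn k u) then some (r, lab) else pvBest u rest none := by
  induction l with
  | nil => simp
  | cons k l ih =>
    simp only [List.map_cons, List.cons_append, pvBest, Option.isNone_none, Bool.true_or,
      Bool.and_true, List.any_cons]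
    by_cases hk : PySem.Str.isIn k u = true
    · rw [if_pos hk]
      simp only [hk, Bool.true_or, if_pos]
      exact pvBest_keep u _ r lab (by
        intro p hp
        rcases List.mem_append.mp hp with hp | hp
        · obtain ⟨kw, _, rfl⟩ := List.mem_map.mp hp; exact le_refl r
        · exact h p hp)
    · simp only [Bool.not_eq_true] at hk
      rw [if_neg (by simp only [hk]; exact Bool.false_ne_true), ih]
      simp only [hk, Bool.false_or]

theorem pvBest_group_nil (u : String) (l : List String) (r : Nat) (lab : String) :
    pvBest u (l.map (fun kw => (kw, r, lab))) none =
      if l.any (fun k => PySem.Str.isIn k u) then some (r, lab) else none := by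
  have := pvBest_group u l r lab [] (by simp)
  simpa using this

theorem pvSub_equity : (pvSubTables.get? "Equity").getD ([], "Other") = (((["LARGE CAP", "LARGECAP", "BLUECHIP", "TOP 100", "NIFTY 50"].map (fun kw => (kw, 0, "Large Cap"))) ++ ((["MID CAP", "MIDCAP", "MID-CAP"].map (fun kw => (kw, 1, "Mid Cap"))) ++ ((["SMALL CAP", "SMALLCAP", "SMALL-CAP"].map (fun kw => (kw, 2, "Small Cap"))) ++ ((["MULTI CAP", "MULTICAP", "MULTI-CAP"].map (fun kw => (kw, 3, "Multi Cap"))) ++ (["FLEXI CAP", "FLEXICAP", "FLEXI-CAP"].map (fun kw => (kw, 4, "Flexi Cap"))))))), "Other Equity") := by decide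

theorem pvSub_debt : (pvSubTables.get? "Debt").getD ([], "Other") = (((["LIQUID", "OVERNIGHT"].map (fun kw => (kw, 0, "Liquid"))) ++ ((["ULTRA SHORT", "SHORT TERM"].map (fun kw => (kw, 1, "Short Term"))) ++ ((["MEDIUM TERM", "INTERMEDIATE"].map (fun kw => (kw, 2, "Medium Term"))) ++ (["LONG TERM", "GILT"].map (fun kw => (kw, 3, "Long Term")))))), "Other Debt") := by decide

theorem pvSub_other : (pvSubTables.get? "Other").getD ([], "Other") = ([], "Other") := by decide

theorem pvCat_eval (u : String) : pvBest u pvCatTable none =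
    (if ["EQUITY", "BLUECHIP", "LARGECAP", "MIDCAP", "SMALLCAP", "MULTICAP", "FLEXICAP", "FOCUSED", "ELSS", "TAX SAVER", "INDEX", "VALUE", "CONTRA", "DIVIDEND", "SECTOR", "THEMATIC", "PHARMA", "TECHNOLOGY", "INFRASTRUCTURE"].any (fun k => PySem.Str.isIn k u) then some (0, "Equity")
     else if ["DEBT", "BOND", "GILT", "LIQUID", "ULTRA SHORT", "SHORT TERM", "MEDIUM TERM", "LONG TERM", "CORPORATE BOND", "FIXED", "INCOME", "CREDIT RISK", "FLOATING RATE", "MONEY MARKET", "TREASURY", "PSU", "BANKING & PSU"].any (fun k => PySem.Str.isIn k u) then some (1, "Debt") else none) := by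
  rw [pvCatTable, pvBest_group u ["EQUITY", "BLUECHIP", "LARGECAP", "MIDCAP", "SMALLCAP", "MULTICAP", "FLEXICAP", "FOCUSED", "ELSS", "TAX SAVER", "INDEX", "VALUE", "CONTRA", "DIVIDEND", "SECTOR", "THEMATIC", "PHARMA", "TECHNOLOGY", "INFRASTRUCTURE"] 0 "Equity" (["DEBT", "BOND", "GILT", "LIQUID", "ULTRA SHORT", "SHORT TERM", "MEDIUM TERM", "LONG TERM", "CORPORATE BOND", "FIXED", "INCOME", "CREDIT RISK", "FLOATING RATE", "MONEY MARKET", "TREASURY", "PSU", "BANKING & PSU"].map (fun kw => (kw, 1, "Debt"))) (by decide),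
      pvBest_group_nil u ["DEBT", "BOND", "GILT", "LIQUID", "ULTRA SHORT", "SHORT TERM", "MEDIUM TERM", "LONG TERM", "CORPORATE BOND", "FIXED", "INCOME", "CREDIT RISK", "FLOATING RATE", "MONEY MARKET", "TREASURY", "PSU", "BANKING & PSU"] 1 "Debt"]

theorem pvSubEq_eval (u : String) : pvBest u ((["LARGE CAP", "LARGECAP", "BLUECHIP", "TOP 100", "NIFTY 50"].map (fun kw => (kw, 0, "Large Cap"))) ++ ((["MID CAP", "MIDCAP", "MID-CAP"].map (fun kw => (kw, 1, "Mid Cap"))) ++ ((["SMALL CAP", "SMALLCAP", "SMALL-CAP"].map (fun kw => (kw, 2, "Small Cap"))) ++ ((["MULTI CAP", "MULTICAP", "MULTI-CAP"].map (fun kw => (kw, 3, "Multi Cap"))) ++ (["FLEXI CAP", "FLEXICAP", "FLEXI-CAP"].map (fun kw => (kw, 4, "Flexi Cap"))))))) none = (if ["LARGE CAP", "LARGECAP", "BLUECHIP", "TOP 100", "NIFTY 50"].any (fun k => PySem.Str.isIn k u) then some (0, "Large Cap") else (if ["MID CAP", "MIDCAP", "MID-CAP"].any (fun k => PySem.Str.isIn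 k u) then some (1, "Mid Cap") else (if ["SMALL CAP", "SMALLCAP", "SMALL-CAP"].any (fun k => PySem.Str.isIn k u) then some (2, "Small Cap") else (if ["MULTI CAP", "MULTICAP", "MULTI-CAP"].any (fun k => PySem.Str.isIn k u) then some (3, "Multi Cap") else (if ["FLEXI CAP", "FLEXICAP", "FLEXI-CAP"].any (fun k => PySem.Str.isIn k u) then some (4, "Flexi Cap") else none))))) := by
  rw [pvBest_group u ["LARGE CAP", "LARGECAP", "BLUECHIP", "TOP 100", "NIFTY 50"] 0 "Large Cap" ((["MID CAP", "MIDCAP", "MID-CAP"].map (fun kw => (kw, 1, "Mid Cap"))) ++ ((["SMALL CAP", "SMALLCAP", "SMALL-CAP"].map (fun kw => (kw, 2, "Small Cap"))) ++ ((["MULTI CAP", "MULTICAP", "MULTI-CAP"].map (fun kw => (kw, 3, "Multi Cap"))) ++ (["FLEXI CAP", "FLEXICAP", "FLEXI-CAP"].map (fun kw => (kw, 4, "Flexi Cap")))))) (by decide), pvBest_group u ["MID CAP", "MIDCAP", "MID-CAP"] 1 "Mid Cap" ((["SMALL CAP", "SMALLCAP", "SMALL-CAP"].map (fun kw => (kw,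 2, "Small Cap"))) ++ ((["MULTI CAP", "MULTICAP", "MULTI-CAP"].map (fun kw => (kw, 3, "Multi Cap"))) ++ (["FLEXI CAP", "FLEXICAP", "FLEXI-CAP"].map (fun kw => (kw, 4, "Flexi Cap"))))) (by decide), pvBest_group u ["SMALL CAP", "SMALLCAP", "SMALL-CAP"] 2 "Small Cap" ((["MULTI CAP", "MULTICAP", "MULTI-CAP"].map (fun kw => (kw, 3, "Multi Cap"))) ++ (["FLEXI CAP", "FLEXICAP", "FLEXI-CAP"].map (fun kw => (kw, 4, "Flexi Cap")))) (by decide), pvBest_group u ["MULTI CAP", "MULTICAP", "MULTI-CAP"] 3 "Multi Cap" (["FLEXI CAP", "FLEXICAP", "FLEXI-CAP"].map (fun kw => (kw, 4, "Flexi Cap"))) (by decide), pvBest_group_nil u ["FLEXI CAP", "FLEXICAP", "FLEXI-CAP"] 4 "Flexi Cap"]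

theorem pvSubDb_eval (u : String) : pvBest u ((["LIQUID", "OVERNIGHT"].map (fun kw => (kw, 0, "Liquid"))) ++ ((["ULTRA SHORT", "SHORT TERM"].map (fun kw => (kw, 1, "Short Term"))) ++ ((["MEDIUM TERM", "INTERMEDIATE"].map (fun kw => (kw, 2, "Medium Term"))) ++ (["LONG TERM", "GILT"].map (fun kw => (kw, 3, "Long Term")))))) none = (if ["LIQUID", "OVERNIGHT"].any (fun k => PySem.Str.isIn k u) then some (0, "Liquid") else (if ["ULTRA SHORT", "SHORT TERM"].any (fun k => PySem.Str.isIn k u) then some (1, "Short Term") else (if ["MEDIUM TERM", "INTERMEDIATE"].any (fun k => PySem.Str.isIn k u) then some (2, "Medium Term") else (if ["LONG TERM", "GILT"].any (fun k => PySem.Str.isIn k u) then some (3, "Long Term") else none)))) := by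
  rw [pvBest_group u ["LIQUID", "OVERNIGHT"] 0 "Liquid" ((["ULTRA SHORT", "SHORT TERM"].map (fun kw => (kw, 1, "Short Term"))) ++ ((["MEDIUM TERM", "INTERMEDIATE"].map (fun kw => (kw, 2, "Medium Term"))) ++ (["LONG TERM", "GILT"].map (fun kw => (kw, 3, "Long Term"))))) (by decide), pvBest_group u ["ULTRA SHORT", "SHORT TERM"] 1 "Short Term" ((["MEDIUM TERM", "INTERMEDIATE"].map (fun kw => (kw, 2, "Medium Term"))) ++ (["LONG TERM", "GILT"].map (fun kw => (kw, 3, "Long Term")))) (by decide), pvBest_group u ["MEDIUM TERM", "INTERMEDIATE"] 2 "Medium Term" (["LONG TERM", "GILT"].map (fun kw => (kw, 3, "Long Term"))) (by decide), pvBest_group_nil u ["LONG TERM", "GILT"] 3 "Long Term"]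

-- ===== VERDICT (by name: the statement is the Claim_ definition above) =====
theorem classify_fund_spec : Claim_equal_classify_fund := by
  intro s _
  unfold Spec_classify_fund classify_fund classify_fund_alt
  simp only [pvCat_eval]
  by_cases h1 : (["EQUITY", "BLUECHIP", "LARGECAP", "MIDCAP", "SMALLCAP", "MULTICAP", "FLEXICAP", "FOCUSED", "ELSS", "TAX SAVER", "INDEX", "VALUE", "CONTRA", "DIVIDEND", "SECTOR", "THEMATIC", "PHARMA", "TECHNOLOGY", "INFRASTRUCTURE"].any (fun k => PySem.Str.isIn k (PySem.Str.upper s))) = true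
  · simp only [h1, if_true, pvSub_equity, pvSubEq_eval]
    split_ifs <;> simp_all
  · simp only [h1, Bool.false_eq_true, if_false]
    by_cases h2 : (["DEBT", "BOND", "GILT", "LIQUID", "ULTRA SHORT", "SHORT TERM", "MEDIUM TERM", "LONG TERM", "CORPORATE BOND", "FIXED", "INCOME", "CREDIT RISK", "FLOATING RATE", "MONEY MARKET", "TREASURY", "PSU", "BANKING & PSU"].any (fun k => PySem.Str.isIn k (PySem.Str.upper s))) = true
    · simp only [h2, if_true, pvSub_debt, pvSubDb_eval]
      split_ifs <;> simp_all
    · simp only [h2, Bool.false_eq_true, if_false, pvSub_other]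
      simp [pvBest]
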